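-- pv_equiv track=rewrite | github.com/AIMFllys/StudySolo-Dev | backend/app/services/workflow_canvas_service.py | _detect_cycle_nodes
-- ===== SOURCE A (Python) =====
-- from collections import defaultdict, deque
--
-- def _detect_cycle_nodes(node_ids: set[str], outgoing: dict[str, list[str]]) -> set[str]:
--     indegree = {node_id: 0 for node_id in node_ids}
--     for source, targets in outgoing.items():
--         if source not in node_ids:
--             continue
--         for target in targets:
--             if target in indegree:
--                 indegree[target] += 1
--     queue = deque([node_id for node_id, degree in indegree.items() if degree == 0])
--     visited: set[str] = set()
--     while queue:
--         node_id = queue.popleft()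
--         visited.add(node_id)
--         for target in outgoing.get(node_id, []):
--             if target not in indegree:
--                 continue
--             indegree[target] -= 1
--             if indegree[target] == 0:
--                 queue.append(target)
--     return node_ids - visited
-- ===== SOURCE B (Python) =====
-- from collections import Counter
--
-- def _detect_cycle_nodes(node_ids: set[str], outgoing: dict[str, list[str]]) -> set[str]:
--     # Fixpoint peeling: each pass recounts every node's indegree from scratch,
--     # counting only edges whose source still survives, then deletes all survivors
--     # with recounted indegree zero; the nodes left when a pass deletes nothing
--     # are the cycle (and downstream-of-cycle) nodes.
--     survivors = set(node_ids)
--     while True: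
--         indeg = Counter()
--         for source, targets in outgoing.items():
--             if source in survivors:
--                 indeg.update(targets)
--         peeled = {n for n in survivors if indeg[n] == 0}
--         if not peeled:
--             return survivors
--         survivors = survivors - peeled
-- ===== Notes on version B (the rewrite author's own statement) =====
-- stated objective: alternative
-- what changed: A's Kahn worklist (indegree dict decremented incrementally, FIFO queue of zero-indegree nodes, visited set, result = node_ids - visited) is replaced by an until-stable peeling loop that on every pass recounts all indegrees from scratch over edges whose source still survives and deletes every survivor whose recounted indegree is zero, returning the survivors once a pass deletes nothing.
import Mathlib
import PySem

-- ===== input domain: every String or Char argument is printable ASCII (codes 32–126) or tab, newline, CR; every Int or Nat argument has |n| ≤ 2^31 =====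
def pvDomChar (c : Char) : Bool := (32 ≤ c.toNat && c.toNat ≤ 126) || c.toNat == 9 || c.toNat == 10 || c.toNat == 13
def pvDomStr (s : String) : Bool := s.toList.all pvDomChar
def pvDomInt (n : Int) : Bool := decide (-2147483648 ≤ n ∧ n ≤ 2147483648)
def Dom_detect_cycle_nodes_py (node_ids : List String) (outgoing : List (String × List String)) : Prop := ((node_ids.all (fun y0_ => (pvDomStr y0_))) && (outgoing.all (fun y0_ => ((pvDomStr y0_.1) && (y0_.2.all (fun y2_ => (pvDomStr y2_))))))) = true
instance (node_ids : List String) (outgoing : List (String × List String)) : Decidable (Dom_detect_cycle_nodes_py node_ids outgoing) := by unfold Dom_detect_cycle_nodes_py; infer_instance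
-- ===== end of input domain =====

-- B replaces A's Kahn worklist (queue + incremental indegree decrements) by an
-- until-stable peeling loop that recounts indegrees among the survivors each pass;
-- objective: alternative (same result, structurally different traversal).

-- ===== PORT A =====
-- Kahn's algorithm: indegree table, queue of indegree-0 nodes, visited set; result = node_ids - visited.
def kahnBump (d : PySem.Dict String Int) (t : String) : PySem.Dict String Int :=
  if d.contains t then d.modify t 0 (· + 1) else d

def kahnIncr (node_ids : List String) (d : PySem.Dict String Int) (st : String × List String) :
    PySem.Dict String Int :=
  if !(PySem.Set.contains node_ids st.1) then d
  else st.2.foldl kahnBump d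

def kahnInit (node_ids : List String) (og : PySem.Dict String (List String)) :
    PySem.Dict String Int :=
  let indegree := node_ids.foldl (fun d nid => d.insert nid 0) PySem.Dict.empty
  og.items.foldl (kahnIncr node_ids) indegree

def kahnRelax (qd : List String × PySem.Dict String Int) (t : String) :
    List String × PySem.Dict String Int :=
  if qd.2.contains t then
    let d := qd.2.modify t 0 (· - 1)
    if d.getD t 0 == 0 then (qd.1 ++ [t], d) else (qd.1, d)
  else qd

-- the while-queue loop; fuel (node_ids.length + 1) only makes the recursion structural,
-- it is never exhausted (each iteration visits a fresh node of the key set)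
def kahnLoop (og : PySem.Dict String (List String)) :
    Nat → List String → PySem.Set String → PySem.Dict String Int → PySem.Set String
  | 0, _, vis, _ => vis
  | _ + 1, [], vis, _ => vis
  | f + 1, n :: q, vis, d =>
    let vis' := PySem.Set.add vis n
    let p := (og.getD n []).foldl kahnRelax (q, d)
    kahnLoop og f p.1 vis' p.2

def detect_cycle_nodes_py (node_ids : List String) (outgoing : List (String × List String)) :
    List String :=
  let og := PySem.Dict.ofList outgoing
  let indegree := kahnInit node_ids og
  let queue := (indegree.items.filter (fun p => p.2 == 0)).map (·.1)
  let visited := kahnLoop og (node_ids.length + 1) queue PySem.Set.empty indegree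
  PySem.Set.diff node_ids visited

-- ===== PORT B =====
-- fixpoint peeling: recount indegrees from scratch among the survivors, delete the zeros, repeat until stable
def peelTally (survivors : List String) (ind : PySem.Dict String Int) (st : String × List String) :
    PySem.Dict String Int :=
  if PySem.Set.contains survivors st.1 then
    st.2.foldl (fun ind t => ind.modify t 0 (· + 1)) ind
  else ind

def peelIndeg (og : PySem.Dict String (List String)) (survivors : List String) :
    PySem.Dict String Int :=
  og.items.foldl (peelTally survivors) PySem.Dict.empty

def peelLoop (og : PySem.Dict String (List String)) (survivors : PySem.Set String) :
    PySem.Set String :=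
  let peeled := survivors.filter (fun n => (peelIndeg og survivors).getD n 0 == 0)
  if h : peeled = [] then survivors
  else
    have hlt : (PySem.Set.diff survivors peeled).length < survivors.length := by
      obtain ⟨x, hx⟩ := List.exists_mem_of_ne_nil peeled h
      have hxs : x ∈ survivors := List.mem_of_mem_filter hx
      exact List.length_filter_lt_length_iff_exists.mpr
        ⟨x, hxs, by simp [PySem.Set.diff, PySem.Set.contains, List.contains_iff_mem, hx]⟩
    peelLoop og (PySem.Set.diff survivors peeled)
termination_by survivors.length

def detect_cycle_nodes_py_alt (node_ids : List String) (outgoing : List (String × List String)) :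
    List String :=
  peelLoop (PySem.Dict.ofList outgoing) (PySem.Set.ofList node_ids)

-- ===== PRECONDITION & SPEC =====
-- node_ids is a Python set[str]: its List String encoding holds the distinct elements, so
-- duplicate-free; Pre_ excludes only duplicate-carrying lists, which encode no valid input of A.
def Pre_detect_cycle_nodes_py (node_ids : List String) (outgoing : List (String × List String)) : Prop :=
  node_ids.Nodup

instance (node_ids : List String) (outgoing : List (String × List String)) :
    Decidable (Pre_detect_cycle_nodes_py node_ids outgoing) := by
  unfold Pre_detect_cycle_nodes_py; infer_instance

def pvWitness_detect_cycle_nodes_py : List String × (List (String × List String)) :=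
  (["a", "b", "c"], [("a", ["b", "a"]), ("b", ["c"])])

def Spec_detect_cycle_nodes_py (node_ids : List String) (outgoing : List (String × List String)) (out : List String) : Prop := out = detect_cycle_nodes_py_alt node_ids outgoing
instance (node_ids : List String) (outgoing : List (String × List String)) (out : List String) : Decidable (Spec_detect_cycle_nodes_py node_ids outgoing out) := by unfold Spec_detect_cycle_nodes_py; infer_instance

-- ===== CLAIM (what is proved, stated in full; the proofs are below) =====
def Claim_equal_detect_cycle_nodes_py : Prop := ∀ (node_ids : List String) (outgoing : List (String × List String)), Dom_detect_cycle_nodes_py node_ids outgoing → Pre_detect_cycle_nodes_py node_ids outgoing → Spec_detect_cycle_nodes_py node_ids outgoing (detect_cycle_nodes_py node_ids outgoing)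

-- ===== LEMMAS AND PROOFS =====

-- remL l ids vis v = number of edges into v from entries of l whose source is in ids but not in vis
def remL (l : List (String × List String)) (ids vis : List String) (v : String) : Nat :=
  ((l.filter (fun st => decide (st.1 ∈ ids) && !decide (st.1 ∈ vis))).map
    (fun st => st.2.count v)).sum

-- v is "peelable": every in-edge within ids comes from a peelable source
inductive InCl (og : PySem.Dict String (List String)) (ids : List String) : String → Prop
  | mk (v : String) (h : ∀ st ∈ og.items, st.1 ∈ ids → v ∈ st.2 → InCl og ids st.1) :
      InCl og ids v

lemma remL_eq_zero_iff (l : List (String × List String)) (ids vis : List String) (v : String) :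
    remL l ids vis v = 0 ↔ ∀ st ∈ l, st.1 ∈ ids → st.1 ∉ vis → v ∉ st.2 := by
  simp only [remL, List.sum_eq_zero_iff, List.mem_map, List.mem_filter, Bool.and_eq_true,
    Bool.not_eq_true', decide_eq_true_eq, decide_eq_false_iff_not, forall_exists_index]
  constructor
  · intro h st hst h1 h2 hv
    have h0 := h (st.2.count v) st ⟨⟨hst, h1, h2⟩, rfl⟩
    exact absurd (List.count_eq_zero.mp h0) (by simpa using hv)
  · rintro h x st ⟨⟨hst, h1, h2⟩, rfl⟩
    exact List.count_eq_zero.mpr (h st hst h1 h2)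
lemma incl_of_rem_zero (og : PySem.Dict String (List String)) (ids vis : List String) (x : String)
    (h0 : remL og.items ids vis x = 0) (hvis : ∀ u, u ∈ vis → InCl og ids u) : InCl og ids x := by
  constructor
  intro st hst h1 h2
  by_cases hv : st.1 ∈ vis
  · exact hvis _ hv
  · exact absurd h2 ((remL_eq_zero_iff _ _ _ _).mp h0 st hst h1 hv)
lemma remL_vis_snoc (l : List (String × List String)) (ids vis : List String) (n v : String)
    (hn : n ∈ ids) (hnv : n ∉ vis) :
    remL l ids vis v = remL l ids (vis ++ [n]) v
      + ((l.filter (fun st => st.1 == n)).map (fun st => st.2.count v)).sum := by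
  induction l with
  | nil => simp [remL]
  | cons st l ih =>
    by_cases he : st.1 = n
    · have h1 : (decide (st.1 ∈ ids) && !decide (st.1 ∈ vis)) = true := by
        simp [he, hn, hnv]
      have h2 : (decide (st.1 ∈ ids) && !decide (st.1 ∈ vis ++ [n])) = false := by
        simp [he]
      have h3 : (st.1 == n) = true := by simp [he]
      simp only [remL, List.filter_cons, h1, h2, h3, if_true, Bool.false_eq_true, if_false,
        List.map_cons, List.sum_cons]
      have hih := ih
      simp only [remL] at hih
      omega
    · have h2 : (decide (st.1 ∈ vis ++ [n])) = (decide (st.1 ∈ vis)) := by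
        simp [List.mem_append, he]
      simp only [remL, List.filter_cons, h2, beq_iff_eq, if_neg he] at *
      by_cases h1 : (decide (st.1 ∈ ids) && !decide (st.1 ∈ vis)) = true
      · simp [h1, ih]; omega
      · simp only [Bool.not_eq_true] at h1
        simp [h1, ih]

lemma filter_key_of_nodup (l : List (String × List String)) (n : String) (ts : List String)
    (hnd : (l.map Prod.fst).Nodup) (hmem : (n, ts) ∈ l) :
    l.filter (fun st => st.1 == n) = [(n, ts)] := by
  induction l with
  | nil => simp at hmem
  | cons st l ih =>
    simp only [List.map_cons, List.nodup_cons] at hnd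
    rcases List.mem_cons.mp hmem with h | h
    · subst h
      simp only [List.filter_cons, beq_self_eq_true, if_pos]
      have : l.filter (fun st => st.1 == n) = [] := by
        apply List.filter_eq_nil_iff.mpr
        intro p hp hpn
        exact hnd.1 (List.mem_map.mpr ⟨p, hp, beq_iff_eq.mp hpn⟩)
      simp [this]
    · have hne : st.1 ≠ n := by
        rintro rfl
        exact hnd.1 (List.mem_map.mpr ⟨(st.1, ts), h, rfl⟩)
      simp only [List.filter_cons, beq_iff_eq, if_neg hne]
      exact ih hnd.2 h

lemma filter_key_of_not_mem (l : List (String × List String)) (n : String)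
    (hmem : n ∉ l.map Prod.fst) :
    l.filter (fun st => st.1 == n) = [] := by
  apply List.filter_eq_nil_iff.mpr
  intro p hp hpn
  exact hmem (List.mem_map.mpr ⟨p, hp, beq_iff_eq.mp hpn⟩)

lemma remL_split (og : PySem.Dict String (List String)) (ids vis : List String) (n v : String)
    (hn : n ∈ ids) (hnv : n ∉ vis) (hog : og.keys.Nodup) :
    remL og.items ids vis v = remL og.items ids (vis ++ [n]) v + (og.getD n []).count v := by
  rw [remL_vis_snoc og.items ids vis n v hn hnv]
  congr 1
  have hkeys : og.keys = og.items.map Prod.fst := by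
    simp [PySem.Dict.keys]
  by_cases hc : og.contains n = true
  · obtain ⟨ts, hts⟩ : ∃ ts, og.get? n = some ts := by
      cases h : og.get? n with
      | none =>
        rw [PySem.Dict.get?_eq_none_iff_contains] at h
        simp [h] at hc
      | some ts => exact ⟨ts, rfl⟩
    have hmem := PySem.Dict.mem_items_of_get?_eq_some og hts
    rw [filter_key_of_nodup og.items n ts (hkeys ▸ hog) hmem]
    rw [PySem.Dict.getD_of_mem_items og hmem hog]
    simp
  · have hnm : n ∉ og.items.map Prod.fst := by
      rw [← hkeys]
      intro hmem
      exact hc ((PySem.Dict.contains_iff_mem_keys og n).mpr hmem)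
    rw [filter_key_of_not_mem og.items n hnm,
      PySem.Dict.getD_of_not_contains og [] (by simpa using hc)]
    simp
structure FInv (og : PySem.Dict String (List String)) (ids vis rest q : List String)
    (d : PySem.Dict String Int) : Prop where
  keys : d.keys = ids
  val : ∀ v ∈ ids, d.getD v 0 = ((remL og.items ids vis v + rest.count v : Nat) : Int)
  qNd : q.Nodup
  qSub : q ⊆ ids
  qVis : ∀ x ∈ q, x ∉ vis
  zero : ∀ v ∈ ids, (v ∈ vis ∨ v ∈ q) ↔ remL og.items ids vis v + rest.count v = 0
  clos : ∀ x, (x ∈ vis ∨ x ∈ q) → InCl og ids x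

lemma count_cons_self (t : String) (l : List String) : (t :: l).count t = l.count t + 1 := by
  simp [List.count_cons]

lemma count_cons_ne (v t : String) (l : List String) (h : v ≠ t) :
    (t :: l).count v = l.count v := by
  simp [List.count_cons, Ne.symm h]

lemma fold_step (og : PySem.Dict String (List String)) (ids vis : List String) :
    ∀ (rest q : List String) (d : PySem.Dict String Int), FInv og ids vis rest q d →
      FInv og ids vis [] (rest.foldl kahnRelax (q, d)).1 (rest.foldl kahnRelax (q, d)).2 := by
  intro rest
  induction rest with
  | nil => intro q d hI; exact hI
  | cons t rest' ih =>
    intro q d hI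
    by_cases hc : d.contains t = true
    · have htids : t ∈ ids := by
        rw [← hI.keys]; exact (PySem.Dict.contains_iff_mem_keys d t).mp hc
      have hkeys' : (d.modify t 0 (· - 1)).keys = ids := by
        rw [PySem.Dict.keys_modify, PySem.Dict.keys_insert_of_contains _ _ hc]
        exact hI.keys
      have hvalt : (d.modify t 0 (· - 1)).getD t 0
          = ((remL og.items ids vis t + rest'.count t : Nat) : Int) := by
        rw [PySem.Dict.getD_modify, if_pos rfl, hI.val t htids]
        rw [count_cons_self]
        push_cast
        ring
      have hvalo : ∀ v ∈ ids, v ≠ t → (d.modify t 0 (· - 1)).getD v 0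
          = ((remL og.items ids vis v + rest'.count v : Nat) : Int) := by
        intro v hv hne
        rw [PySem.Dict.getD_modify, if_neg hne, hI.val v hv, count_cons_ne v t rest' hne]
      by_cases hz : ((d.modify t 0 (· - 1)).getD t 0 == 0) = true
      · have hsum0 : remL og.items ids vis t + rest'.count t = 0 := by
          have h1 := beq_iff_eq.mp hz
          rw [hvalt] at h1
          exact_mod_cast h1
        have htq : t ∉ q := by
          intro htq
          have := (hI.zero t htids).mp (Or.inr htq)
          rw [count_cons_self] at this
          omega
        have htvis : t ∉ vis := by
          intro htv
          have := (hI.zero t htids).mp (Or.inl htv)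
          rw [count_cons_self] at this
          omega
        have hrel : kahnRelax (q, d) t = (q ++ [t], d.modify t 0 (· - 1)) := by
          simp only [kahnRelax, hc, if_true, hz]
        have hF : FInv og ids vis rest' (q ++ [t]) (d.modify t 0 (· - 1)) := by
          refine ⟨hkeys', ?_, ?_, ?_, ?_, ?_, ?_⟩
          · intro v hv
            by_cases hvt : v = t
            · subst hvt; exact hvalt
            · exact hvalo v hv hvt
          · simp [List.nodup_append, hI.qNd]
            intro a ha h
            exact htq (h ▸ ha)
          · intro x hx
            rcases List.mem_append.mp hx with h | h
            · exact hI.qSub h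
            · simp at h; subst h; exact htids
          · intro x hx
            rcases List.mem_append.mp hx with h | h
            · exact hI.qVis x h
            · simp at h; subst h; exact htvis
          · intro v hv
            by_cases hvt : v = t
            · subst hvt
              constructor
              · intro _; omega
              · intro _; exact Or.inr (List.mem_append.mpr (Or.inr (by simp)))
            · rw [← count_cons_ne v t rest' hvt]
              rw [← hI.zero v hv]
              constructor
              · rintro (h | h)
                · exact Or.inl h
                · rcases List.mem_append.mp h with h | h
                  · exact Or.inr h
                  · simp at h; exact absurd h hvt
              · rintro (h | h)
                · exact Or.inl h
                · exact Or.inr (List.mem_append.mpr (Or.inl h))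
          · intro x hx
            rcases hx with h | h
            · exact hI.clos x (Or.inl h)
            · rcases List.mem_append.mp h with h | h
              · exact hI.clos x (Or.inr h)
              · simp at h; subst h
                exact incl_of_rem_zero og ids vis _ (by omega)
                  (fun u hu => hI.clos u (Or.inl hu))
        have : (t :: rest').foldl kahnRelax (q, d) = rest'.foldl kahnRelax (q ++ [t], d.modify t 0 (· - 1)) := by
          rw [List.foldl_cons, hrel]
        rw [this]
        exact ih _ _ hF
      · have hsumne : remL og.items ids vis t + rest'.count t ≠ 0 := by
          intro h0
          apply hz
          rw [hvalt, h0]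
          simp
        have hrel : kahnRelax (q, d) t = (q, d.modify t 0 (· - 1)) := by
          simp only [kahnRelax, hc, if_true, hz]
          simp at hz
          simp [hz]
        have hF : FInv og ids vis rest' q (d.modify t 0 (· - 1)) := by
          refine ⟨hkeys', ?_, hI.qNd, hI.qSub, hI.qVis, ?_, ?_⟩
          · intro v hv
            by_cases hvt : v = t
            · subst hvt; exact hvalt
            · exact hvalo v hv hvt
          · intro v hv
            by_cases hvt : v = t
            · subst hvt
              constructor
              · intro hin
                have := (hI.zero v hv).mp hin
                rw [count_cons_self] at this
                omega
              · intro h0; exact absurd h0 hsumne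
            · rw [← count_cons_ne v t rest' hvt, ← hI.zero v hv]
          · intro x hx; exact hI.clos x hx
        have : (t :: rest').foldl kahnRelax (q, d) = rest'.foldl kahnRelax (q, d.modify t 0 (· - 1)) := by
          rw [List.foldl_cons, hrel]
        rw [this]
        exact ih _ _ hF
    · have htids : t ∉ ids := by
        rw [← hI.keys]
        intro hmem
        exact hc ((PySem.Dict.contains_iff_mem_keys d t).mpr hmem)
      have hrel : kahnRelax (q, d) t = (q, d) := by
        simp only [kahnRelax]
        simp at hc
        simp [hc]
      have hF : FInv og ids vis rest' q d := by
        refine ⟨hI.keys, ?_, hI.qNd, hI.qSub, hI.qVis, ?_, hI.clos⟩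
        · intro v hv
          rw [hI.val v hv, count_cons_ne v t rest' (fun h => htids (h ▸ hv))]
        · intro v hv
          rw [← count_cons_ne v t rest' (fun h => htids (h ▸ hv)), ← hI.zero v hv]
      have : (t :: rest').foldl kahnRelax (q, d) = rest'.foldl kahnRelax (q, d) := by
        rw [List.foldl_cons, hrel]
      rw [this]
      exact ih _ _ hF

lemma stable_vis (og : PySem.Dict String (List String)) (ids vis : List String)
    (hzero : ∀ v ∈ ids, v ∈ vis ↔ remL og.items ids vis v = 0) :
    ∀ v, InCl og ids v → v ∈ ids → v ∈ vis := by
  intro v hcl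
  induction hcl with
  | mk v h ih =>
    intro hv
    refine (hzero v hv).mpr ((remL_eq_zero_iff _ _ _ _).mpr ?_)
    intro st hst h1 h2 hmem
    exact h2 (ih st hst h1 hmem h1)
lemma kahn_main (og : PySem.Dict String (List String)) (ids : List String)
    (hog : og.keys.Nodup) (hids : ids.Nodup) :
    ∀ (fuel : Nat) (q vis : List String) (d : PySem.Dict String Int),
      FInv og ids vis [] q d → vis.Nodup → vis ⊆ ids →
      ids.length + 1 ≤ fuel + vis.length →
      ∀ v ∈ ids, (v ∈ kahnLoop og fuel q vis d ↔ InCl og ids v) := by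
  intro fuel
  induction fuel with
  | zero =>
    intro q vis d hI hvNd hvSub hlen v hv
    exact absurd (List.Subperm.length_le (List.Nodup.subperm hvNd hvSub)) (by omega)
  | succ f ihf =>
    intro q vis d hI hvNd hvSub hlen v hv
    cases q with
    | nil =>
      show v ∈ vis ↔ InCl og ids v
      constructor
      · intro h; exact hI.clos v (Or.inl h)
      · intro h
        refine stable_vis og ids vis ?_ v h hv
        intro w hw
        have hz := hI.zero w hw
        simpa using hz
    | cons n q' =>
      have hn : n ∈ ids := hI.qSub (List.mem_cons_self ..)
      have hnvis : n ∉ vis := hI.qVis n (List.mem_cons_self ..)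
      have hnq' : n ∉ q' := by
        have := hI.qNd
        rw [List.nodup_cons] at this
        exact this.1
      have hadd : PySem.Set.add vis n = vis ++ [n] := PySem.Set.add_of_not_mem hnvis
      have hFin : FInv og ids (vis ++ [n]) (og.getD n []) q' d := by
        refine ⟨hI.keys, ?_, ?_, ?_, ?_, ?_, ?_⟩
        · intro w hw
          have hval := hI.val w hw
          simp only [List.count_nil, Nat.add_zero] at hval
          rw [hval, remL_split og ids vis n w hn hnvis hog]
        · have := hI.qNd
          rw [List.nodup_cons] at this
          exact this.2
        · intro x hx; exact hI.qSub (List.mem_cons_of_mem _ hx)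
        · intro x hx hmem
          rcases List.mem_append.mp hmem with h | h
          · exact hI.qVis x (List.mem_cons_of_mem _ hx) h
          · simp at h; subst h; exact hnq' hx
        · intro w hw
          have hz := hI.zero w hw
          simp only [List.count_nil, Nat.add_zero] at hz
          rw [← remL_split og ids vis n w hn hnvis hog]
          rw [← hz]
          constructor
          · rintro (h | h)
            · rcases List.mem_append.mp h with h | h
              · exact Or.inl h
              · simp at h; subst h; exact Or.inr (List.mem_cons_self ..)
            · exact Or.inr (List.mem_cons_of_mem _ h)
          · rintro (h | h)
            · exact Or.inl (List.mem_append.mpr (Or.inl h))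
            · rcases List.mem_cons.mp h with h | h
              · subst h; exact Or.inl (List.mem_append.mpr (Or.inr (by simp)))
              · exact Or.inr h
        · intro x hx
          rcases hx with h | h
          · rcases List.mem_append.mp h with h | h
            · exact hI.clos x (Or.inl h)
            · simp at h; subst h; exact hI.clos _ (Or.inr (List.mem_cons_self ..))
          · exact hI.clos x (Or.inr (List.mem_cons_of_mem _ h))
      have hF2 := fold_step og ids (vis ++ [n]) (og.getD n []) q' d hFin
      have hstep : kahnLoop og (f + 1) (n :: q') vis d
          = kahnLoop og f ((og.getD n []).foldl kahnRelax (q', d)).1 (PySem.Set.add vis n)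
              ((og.getD n []).foldl kahnRelax (q', d)).2 := rfl
      rw [hstep, hadd]
      refine ihf _ _ _ hF2 ?_ ?_ ?_ v hv
      · simp [List.nodup_append, hvNd]
        intro a ha h
        exact hnvis (h ▸ ha)
      · intro x hx
        rcases List.mem_append.mp hx with h | h
        · exact hvSub h
        · simp at h; subst h; exact hn
      · simp only [List.length_append, List.length_singleton]
        omega

lemma contains_eq_decide (S : List String) (x : String) :
    PySem.Set.contains S x = decide (x ∈ S) := by
  by_cases h : x ∈ S
  · simp [h, (PySem.Set.contains_iff S x).mpr h]
  · simp only [h, decide_false]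
    cases hc : PySem.Set.contains S x
    · rfl
    · exact absurd ((PySem.Set.contains_iff S x).mp hc) h

lemma zfold_getD (node_ids : List String) :
    ∀ (d : PySem.Dict String Int), (∀ v, d.getD v 0 = 0) →
      ∀ v, (node_ids.foldl (fun d nid => d.insert nid (0 : Int)) d).getD v 0 = 0 := by
  induction node_ids with
  | nil => intro d hd v; exact hd v
  | cons n l ih =>
    intro d hd v
    refine ih _ ?_ v
    intro w
    rw [PySem.Dict.getD_insert]
    split_ifs with h
    · rfl
    · exact hd w

lemma zfold_spec (node_ids : List String) :
    (node_ids.foldl (fun d nid => d.insert nid (0 : Int)) PySem.Dict.empty).keys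
        = PySem.Set.ofList node_ids
      ∧ ∀ v, (node_ids.foldl (fun d nid => d.insert nid (0 : Int)) PySem.Dict.empty).getD v 0 = 0 := by
  constructor
  · have h := PySem.Dict.keys_foldl_insert node_ids (fun _ _ => (0 : Int)) PySem.Dict.empty
    simp only [PySem.Dict.keys_empty] at h
    exact h.trans (PySem.Set.update_nil_left node_ids)
  · exact zfold_getD node_ids PySem.Dict.empty (fun v => PySem.Dict.getD_empty ..)

lemma bump_fold (ids : List String) :
    ∀ (ts : List String) (d : PySem.Dict String Int), d.keys = ids →
      (ts.foldl kahnBump d).keys = ids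
        ∧ ∀ v ∈ ids, (ts.foldl kahnBump d).getD v 0 = d.getD v 0 + (ts.count v : Int) := by
  intro ts
  induction ts with
  | nil => intro d hk; exact ⟨hk, fun v _ => by simp⟩
  | cons t ts ih =>
    intro d hk
    by_cases hc : d.contains t = true
    · have hstep : (t :: ts).foldl kahnBump d = ts.foldl kahnBump (d.modify t 0 (· + 1)) := by
        simp only [List.foldl_cons, kahnBump, hc, if_true]
      have hk' : (d.modify t 0 (· + 1)).keys = ids := by
        rw [PySem.Dict.keys_modify, PySem.Dict.keys_insert_of_contains _ _ hc, hk]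
      obtain ⟨hk2, hv2⟩ := ih _ hk'
      rw [hstep]
      refine ⟨hk2, ?_⟩
      intro v hv
      rw [hv2 v hv, PySem.Dict.getD_modify]
      by_cases hvt : v = t
      · subst hvt
        rw [if_pos rfl, count_cons_self]
        push_cast
        ring
      · rw [if_neg hvt, count_cons_ne v t ts hvt]
    · have htids : t ∉ ids := by
        rw [← hk]
        intro hmem
        exact hc ((PySem.Dict.contains_iff_mem_keys d t).mpr hmem)
      have hstep : (t :: ts).foldl kahnBump d = ts.foldl kahnBump d := by
        simp only [List.foldl_cons, kahnBump]
        simp only [Bool.not_eq_true] at hc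
        simp [hc]
      obtain ⟨hk2, hv2⟩ := ih _ hk
      rw [hstep]
      refine ⟨hk2, ?_⟩
      intro v hv
      rw [hv2 v hv, count_cons_ne v t ts (fun h => htids (h ▸ hv))]

lemma incr_fold (ids : List String) :
    ∀ (l : List (String × List String)) (d : PySem.Dict String Int), d.keys = ids →
      (l.foldl (kahnIncr ids) d).keys = ids
        ∧ ∀ v ∈ ids, (l.foldl (kahnIncr ids) d).getD v 0 = d.getD v 0 + (remL l ids [] v : Int) := by
  intro l
  induction l with
  | nil => intro d hk; exact ⟨hk, fun v _ => by simp [remL]⟩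
  | cons st l ih =>
    intro d hk
    by_cases hs : st.1 ∈ ids
    · have hstep : (st :: l).foldl (kahnIncr ids) d = l.foldl (kahnIncr ids) (st.2.foldl kahnBump d) := by
        simp only [List.foldl_cons, kahnIncr, contains_eq_decide, hs, decide_true,
          Bool.not_true, Bool.false_eq_true, if_false]
      obtain ⟨hbk, hbv⟩ := bump_fold ids st.2 d hk
      obtain ⟨hk2, hv2⟩ := ih _ hbk
      rw [hstep]
      refine ⟨hk2, ?_⟩
      intro v hv
      rw [hv2 v hv, hbv v hv]
      have hrem : remL (st :: l) ids [] v = st.2.count v + remL l ids [] v := by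
        simp [remL, List.filter_cons, hs]
      rw [hrem]
      push_cast
      ring
    · have hstep : (st :: l).foldl (kahnIncr ids) d = l.foldl (kahnIncr ids) d := by
        simp only [List.foldl_cons, kahnIncr, contains_eq_decide, hs, decide_false,
          Bool.not_false, if_true]
      obtain ⟨hk2, hv2⟩ := ih _ hk
      rw [hstep]
      refine ⟨hk2, ?_⟩
      intro v hv
      rw [hv2 v hv]
      have hrem : remL (st :: l) ids [] v = remL l ids [] v := by
        simp [remL, List.filter_cons, hs]
      rw [hrem]

lemma kahnInit_spec (node_ids : List String) (og : PySem.Dict String (List String))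
    (hids : node_ids.Nodup) :
    (kahnInit node_ids og).keys = node_ids
      ∧ ∀ v ∈ node_ids, (kahnInit node_ids og).getD v 0 = (remL og.items node_ids [] v : Int) := by
  obtain ⟨hzk, hzv⟩ := zfold_spec node_ids
  have hzk' : (node_ids.foldl (fun d nid => d.insert nid (0 : Int)) PySem.Dict.empty).keys = node_ids := by
    rw [hzk, PySem.Set.ofList_eq_self_of_nodup node_ids hids]
  obtain ⟨hk, hv⟩ := incr_fold node_ids og.items _ hzk'
  refine ⟨hk, ?_⟩
  intro v hv'
  rw [kahnInit]
  rw [hv v hv', hzv v]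
  ring

lemma peelTally_getD (S : List String) :
    ∀ (l : List (String × List String)) (ind : PySem.Dict String Int) (n : String),
      (l.foldl (peelTally S) ind).getD n 0 = ind.getD n 0 + (remL l S [] n : Int) := by
  intro l
  induction l with
  | nil => intro ind n; simp [remL]
  | cons st l ih =>
    intro ind n
    by_cases hs : st.1 ∈ S
    · have hrem : remL (st :: l) S [] n = st.2.count n + remL l S [] n := by
        simp [remL, List.filter_cons, hs]
      have hstep : (st :: l).foldl (peelTally S) ind
          = l.foldl (peelTally S) (st.2.foldl (fun ind t => ind.modify t 0 (· + 1)) ind) := by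
        rw [List.foldl_cons, peelTally, if_pos ((PySem.Set.contains_iff S st.1).mpr hs)]
      rw [hstep, ih, PySem.Dict.getD_foldl_modify_add_one, hrem]
      push_cast
      ring
    · have hrem : remL (st :: l) S [] n = remL l S [] n := by
        simp [remL, List.filter_cons, hs]
      have hstep : (st :: l).foldl (peelTally S) ind = l.foldl (peelTally S) ind := by
        rw [List.foldl_cons, peelTally,
          if_neg (fun hc => hs ((PySem.Set.contains_iff S st.1).mp hc))]
      rw [hstep, ih, hrem]

lemma peelZero_iff (og : PySem.Dict String (List String)) (S : List String) (n : String) :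
    ((peelIndeg og S).getD n 0 == 0) = true
      ↔ remL og.items S [] n = 0 := by
  rw [peelIndeg, peelTally_getD S og.items PySem.Dict.empty n, PySem.Dict.getD_empty]
  constructor
  · intro h
    have h1 := beq_iff_eq.mp h
    rw [zero_add] at h1
    exact_mod_cast h1
  · intro h
    rw [h]
    simp

lemma incl_not_mem_stable (og : PySem.Dict String (List String)) (ids S : List String)
    (hsub : S ⊆ ids) (hstab : ∀ n ∈ S, remL og.items S [] n ≠ 0) :
    ∀ x, InCl og ids x → x ∉ S := by
  intro x hcl
  induction hcl with
  | mk v h ih =>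
    intro hvS
    have hne := hstab v hvS
    have hex : ∃ st ∈ og.items, st.1 ∈ S ∧ v ∈ st.2 := by
      by_contra hno
      push_neg at hno
      exact hne ((remL_eq_zero_iff _ _ _ _).mpr
        (fun st hst h1 _ h2 => (hno st hst h1) h2))
    obtain ⟨st, hst, hsS, hv2⟩ := hex
    exact ih st hst (hsub hsS) hv2 hsS

lemma peel_eq (og : PySem.Dict String (List String)) (ids : List String) (P : String → Bool)
    (hP : ∀ v ∈ ids, (P v = true ↔ ¬ InCl og ids v)) :
    ∀ (k : Nat) (S : List String), S.length ≤ k → S.Nodup → S ⊆ ids →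
      (∀ v ∈ ids, v ∉ S → InCl og ids v) →
      peelLoop og S = S.filter P := by
  intro k
  induction k with
  | zero =>
    intro S hlen hNd hSub hRem
    have hS : S = [] := List.eq_nil_of_length_eq_zero (Nat.le_zero.mp hlen)
    subst hS
    rw [peelLoop]
    simp
  | succ k ihk =>
    intro S hlen hNd hSub hRem
    have hzero_of : ∀ x ∈ S, ((peelIndeg og S).getD x 0 == 0) = true → remL og.items S [] x = 0 := by
      intro x _ hz
      exact (peelZero_iff og S x).mp hz
    have hkey : ∀ v ∈ S, remL og.items S [] v = 0 → InCl og ids v := by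
      intro v hvS h0
      constructor
      intro st hst h1 h2
      by_cases hsS : st.1 ∈ S
      · exact absurd h2 ((remL_eq_zero_iff _ _ _ _).mp h0 st hst hsS (by simp))
      · exact hRem st.1 h1 hsS
    rw [peelLoop]
    by_cases hstab : S.filter (fun n => (peelIndeg og S).getD n 0 == 0) = []
    · rw [dif_pos hstab]
      symm
      apply List.filter_eq_self.mpr
      intro v hvS
      refine (hP v (hSub hvS)).mpr ?_
      intro hcl
      refine incl_not_mem_stable og ids S hSub ?_ v hcl hvS
      intro n hnS h0
      have hz : ((peelIndeg og S).getD n 0 == 0) = true :=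
        (peelZero_iff og S n).mpr h0
      have hmem : n ∈ S.filter (fun n => (peelIndeg og S).getD n 0 == 0) :=
        List.mem_filter.mpr ⟨hnS, hz⟩
      rw [hstab] at hmem
      simp at hmem
    · rw [dif_neg hstab]
      have hcont : ∀ x ∈ S,
          ((S.filter (fun n => (peelIndeg og S).getD n 0 == 0)).contains x) = ((peelIndeg og S).getD x 0 == 0) := by
        intro x hx
        rw [show ((S.filter (fun n => (peelIndeg og S).getD n 0 == 0)).contains x)
              = PySem.Set.contains (S.filter (fun n => (peelIndeg og S).getD n 0 == 0)) x from rfl]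
        rw [contains_eq_decide]
        by_cases hz : ((peelIndeg og S).getD x 0 == 0) = true
        · simp [List.mem_filter, hx, hz]
        · simp only [Bool.not_eq_true] at hz
          simp [List.mem_filter, hz]
      have hdiff : PySem.Set.diff S (S.filter (fun n => (peelIndeg og S).getD n 0 == 0))
          = S.filter (fun x => !((S.filter (fun n => (peelIndeg og S).getD n 0 == 0)).contains x)) := rfl
      have hlt : (PySem.Set.diff S (S.filter (fun n => (peelIndeg og S).getD n 0 == 0))).length < S.length := by
        obtain ⟨x, hx⟩ := List.exists_mem_of_ne_nil _ hstab
        have hxs : x ∈ S := List.mem_of_mem_filter hx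
        rw [hdiff]
        exact List.length_filter_lt_length_iff_exists.mpr
          ⟨x, hxs, by simp [PySem.Set.contains, List.contains_iff_mem, hx]⟩
      have hsub' : PySem.Set.diff S (S.filter (fun n => (peelIndeg og S).getD n 0 == 0)) ⊆ ids := by
        intro x hx
        rw [hdiff] at hx
        exact hSub (List.mem_of_mem_filter hx)
      have hrem' : ∀ v ∈ ids, v ∉ PySem.Set.diff S (S.filter (fun n => (peelIndeg og S).getD n 0 == 0)) →
          InCl og ids v := by
        intro v hv hvn
        by_cases hvS : v ∈ S
        · rw [hdiff] at hvn
          have : ¬((!((S.filter (fun n => (peelIndeg og S).getD n 0 == 0)).contains v)) = true) :=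
            fun hq => hvn (List.mem_filter.mpr ⟨hvS, hq⟩)
          rw [hcont v hvS] at this
          simp only [Bool.not_eq_true', Bool.not_eq_false] at this
          exact hkey v hvS (hzero_of v hvS this)
        · exact hRem v hv hvS
      have ihr := ihk (PySem.Set.diff S (S.filter (fun n => (peelIndeg og S).getD n 0 == 0)))
        (by omega) (by rw [hdiff]; exact hNd.filter _) hsub' hrem'
      rw [ihr, hdiff, List.filter_filter]
      symm
      apply List.filter_congr
      intro a ha
      by_cases hPa : P a = true
      · have hInCl := (hP a (hSub ha)).mp hPa
        have hq : ((peelIndeg og S).getD a 0 == 0) = false := by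
          by_contra hq
          simp only [Bool.not_eq_false] at hq
          exact hInCl (hkey a ha (hzero_of a ha hq))
        rw [hPa, hcont a ha, hq]
        simp
      · simp only [Bool.not_eq_true] at hPa
        simp [hPa]

-- ===== VERDICT (by name: the statement is the Claim_ definition above) =====
theorem detect_cycle_nodes_py_spec : Claim_equal_detect_cycle_nodes_py := by
  intro node_ids outgoing _ hpre
  have hids : node_ids.Nodup := hpre
  unfold Spec_detect_cycle_nodes_py
  have hog : (PySem.Dict.ofList outgoing).keys.Nodup := PySem.Dict.nodup_keys_ofList outgoing
  obtain ⟨hkeys, hval⟩ := kahnInit_spec node_ids (PySem.Dict.ofList outgoing) hids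
  have hknd : (kahnInit node_ids (PySem.Dict.ofList outgoing)).keys.Nodup := by
    rw [hkeys]; exact hids
  have hkdef : (kahnInit node_ids (PySem.Dict.ofList outgoing)).keys
      = (kahnInit node_ids (PySem.Dict.ofList outgoing)).items.map Prod.fst := by
    simp [PySem.Dict.keys]
  -- initial queue facts
  have hq0sub : ((kahnInit node_ids (PySem.Dict.ofList outgoing)).items.filter
      (fun p => p.2 == 0)).map (·.1) ⊆ node_ids := by
    intro x hx
    obtain ⟨p, hp, hpx⟩ := List.mem_map.mp hx
    have hpi := List.mem_of_mem_filter hp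
    rw [← hkeys, hkdef]
    exact hpx ▸ List.mem_map.mpr ⟨p, hpi, rfl⟩
  have hq0nd : (((kahnInit node_ids (PySem.Dict.ofList outgoing)).items.filter
      (fun p => p.2 == 0)).map (·.1)).Nodup := by
    refine List.Nodup.sublist ?_ (hkdef ▸ hknd)
    exact ((kahnInit node_ids (PySem.Dict.ofList outgoing)).items.filter_sublist).map Prod.fst
  have hq0mem : ∀ v ∈ node_ids,
      (v ∈ ((kahnInit node_ids (PySem.Dict.ofList outgoing)).items.filter
          (fun p => p.2 == 0)).map (·.1)
        ↔ remL (PySem.Dict.ofList outgoing).items node_ids [] v = 0) := by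
    intro v hv
    constructor
    · intro hvq
      obtain ⟨p, hp, hpv⟩ := List.mem_map.mp hvq
      have hpi := List.mem_of_mem_filter hp
      have h2 := (List.mem_filter.mp hp).2
      have hpz : p.2 = 0 := beq_iff_eq.mp h2
      have hget : (kahnInit node_ids (PySem.Dict.ofList outgoing)).getD v 0 = p.2 := by
        refine PySem.Dict.getD_of_mem_items _ ?_ hknd 0
        rw [← hpv]
        exact hpi
      rw [hval v hv, hpz] at hget
      exact_mod_cast hget
    · intro h0
      have hgd : (kahnInit node_ids (PySem.Dict.ofList outgoing)).getD v 0 = 0 := by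
        rw [hval v hv, h0]
        rfl
      have hcont : (kahnInit node_ids (PySem.Dict.ofList outgoing)).contains v = true :=
        (PySem.Dict.contains_iff_mem_keys _ v).mpr (by rw [hkeys]; exact hv)
      obtain ⟨w, hw⟩ : ∃ w, (kahnInit node_ids (PySem.Dict.ofList outgoing)).get? v = some w := by
        cases h : (kahnInit node_ids (PySem.Dict.ofList outgoing)).get? v with
        | none =>
          rw [PySem.Dict.get?_eq_none_iff_contains] at h
          simp [h] at hcont
        | some w => exact ⟨w, rfl⟩
      have hw0 : w = 0 := by
        have := PySem.Dict.getD_eq_get?_getD (kahnInit node_ids (PySem.Dict.ofList outgoing)) v 0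
        rw [hw] at this
        simp only [Option.getD_some] at this
        rw [← this, hgd]
      have hmem := PySem.Dict.mem_items_of_get?_eq_some _ hw
      refine List.mem_map.mpr ⟨(v, w), List.mem_filter.mpr ⟨hmem, by simp [hw0]⟩, rfl⟩
  -- initial loop invariant
  have hF0 : FInv (PySem.Dict.ofList outgoing) node_ids [] []
      (((kahnInit node_ids (PySem.Dict.ofList outgoing)).items.filter
        (fun p => p.2 == 0)).map (·.1))
      (kahnInit node_ids (PySem.Dict.ofList outgoing)) := by
    refine ⟨hkeys, ?_, hq0nd, hq0sub, by simp, ?_, ?_⟩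
    · intro v hv
      simpa using hval v hv
    · intro v hv
      simp only [List.not_mem_nil, false_or, List.count_nil, Nat.add_zero]
      exact hq0mem v hv
    · intro x hx
      rcases hx with h | h
      · simp at h
      · exact incl_of_rem_zero (PySem.Dict.ofList outgoing) node_ids [] x
          ((hq0mem x (hq0sub h)).mp h) (by simp)
  have hvisF := kahn_main (PySem.Dict.ofList outgoing) node_ids hog hids
    (node_ids.length + 1)
    (((kahnInit node_ids (PySem.Dict.ofList outgoing)).items.filter
      (fun p => p.2 == 0)).map (·.1))
    [] (kahnInit node_ids (PySem.Dict.ofList outgoing)) hF0 (by simp) (by simp) (by simp)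
  -- the two outputs
  have hB := peel_eq (PySem.Dict.ofList outgoing) node_ids
    (fun x => !(PySem.Set.contains (kahnLoop (PySem.Dict.ofList outgoing)
        (node_ids.length + 1)
        (((kahnInit node_ids (PySem.Dict.ofList outgoing)).items.filter
          (fun p => p.2 == 0)).map (·.1))
        [] (kahnInit node_ids (PySem.Dict.ofList outgoing))) x))
    (fun v hv => by
      simp only [contains_eq_decide, Bool.not_eq_true', decide_eq_false_iff_not]
      rw [hvisF v hv])
    node_ids.length node_ids (le_refl _) hids (fun x hx => hx) (fun v hv hnv => absurd hv hnv)
  show detect_cycle_nodes_py node_ids outgoing = detect_cycle_nodes_py_alt node_ids outgoing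
  rw [detect_cycle_nodes_py, detect_cycle_nodes_py_alt,
    PySem.Set.ofList_eq_self_of_nodup node_ids hids]
  exact (hB ▸ rfl)
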